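-- pv_equiv track=rewrite | github.com/MaverickPoly/python-dsa-practices | Robocontest/olymp23.py | dir_reduce
-- ===== SOURCE A (Python) =====
-- def dir_reduce(arr):
--     opposites = {
--         "NORTH": "SOUTH",
--         "SOUTH": "NORTH",
--         "EAST": "WEST",
--         "WEST": "EAST"
--     }
--
--     stack = []
--     for direction in arr:
--         if stack and stack[-1] == opposites[direction]:
--             stack.pop()
--         else:
--             stack.append(direction)
--     return stack
-- ===== SOURCE B (Python) =====
-- def dir_reduce(arr):
--     opposites = {
--         "NORTH": "SOUTH",
--         "SOUTH": "NORTH",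
--         "EAST": "WEST",
--         "WEST": "EAST"
--     }
--
--     res = list(arr)
--     changed = True
--     while changed:
--         changed = False
--         for i in range(len(res) - 1):
--             if opposites.get(res[i]) == res[i + 1]:
--                 del res[i:i + 2]
--                 changed = True
--                 break
--     return res
-- ===== Notes on version B (the rewrite author's own statement) =====
-- stated objective: alternative
-- what changed: Replaces the single-pass stack with a fixed-point of repeated scans: find the first adjacent opposite pair, delete it, restart, until a pass finds none (equal by confluence of opposite-pair cancellation).
-- outside the precondition, e.g. on dir_reduce(['NORTH', 'SOUTH', 'FOO']): A returns ['FOO'], B returns ['FOO']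
import Mathlib
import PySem

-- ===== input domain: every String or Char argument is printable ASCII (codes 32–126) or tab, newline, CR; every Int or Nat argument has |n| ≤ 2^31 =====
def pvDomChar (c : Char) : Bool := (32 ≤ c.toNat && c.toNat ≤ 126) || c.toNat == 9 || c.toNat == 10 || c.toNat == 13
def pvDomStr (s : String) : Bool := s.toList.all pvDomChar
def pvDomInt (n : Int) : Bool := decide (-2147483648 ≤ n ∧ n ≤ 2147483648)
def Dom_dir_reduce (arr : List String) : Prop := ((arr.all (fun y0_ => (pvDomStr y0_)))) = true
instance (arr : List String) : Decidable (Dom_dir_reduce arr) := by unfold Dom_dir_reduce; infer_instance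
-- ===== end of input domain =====

-- B does not mutate its argument (A returns a fresh list); equivalence is about the return value.

-- ===== PORT A =====
-- the literal dict from A
def opposites : PySem.Dict String String :=
  PySem.Dict.ofList [("NORTH", "SOUTH"), ("SOUTH", "NORTH"), ("EAST", "WEST"), ("WEST", "EAST")]

-- one loop iteration; `none` state = KeyError already raised.  Python's `stack and
-- stack[-1] == opposites[direction]` short-circuits: opposites[direction] is only
-- evaluated (and can only raise KeyError) when the stack is nonempty.
def stepA (st : Option (List String)) (direction : String) : Option (List String) :=
  match st with
  | none => none
  | some stack =>
    if stack = [] then some (stack ++ [direction])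
    else
      match PySem.Dict.get? opposites direction with
      | none => none                                 -- KeyError
      | some o =>
        if stack.getLast? = some o then some stack.dropLast
        else some (stack ++ [direction])

def dir_reduce (arr : List String) : List String :=
  (arr.foldl stepA (some [])).getD []                -- getD unreachable inside Pre_ (no KeyError there)

-- ===== PORT B =====
-- the inner `for i in range(len(res)-1)` with its `break`: first adjacent pair with
-- opposites.get(res[i]) == res[i+1] is deleted; none found → `None`
def cancelOnce : List String → Option (List String)
  | a :: b :: rest =>
    if PySem.Dict.get? opposites a = some b then some rest
    else (cancelOnce (b :: rest)).map (a :: ·)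
  | _ => none

theorem cancelOnce_length : ∀ {l r : List String}, cancelOnce l = some r → r.length < l.length := by
  intro l
  induction l with
  | nil => intro r h; simp [cancelOnce] at h
  | cons a t ih =>
    intro r h
    match t with
    | [] => simp [cancelOnce] at h
    | b :: rest =>
      simp only [cancelOnce] at h
      split at h
      · cases h; simp
      · cases hr : cancelOnce (b :: rest) with
        | none => rw [hr] at h; simp at h
        | some r' =>
          rw [hr] at h
          cases h
          have := ih hr
          simpa using Nat.succ_lt_succ this

-- the outer `while changed` loop: delete the first pair, restart the pass
def dir_reduce_alt (arr : List String) : List String :=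
  match h : cancelOnce arr with
  | some r => dir_reduce_alt r
  | none => arr
termination_by arr.length
decreasing_by exact cancelOnce_length h

-- ===== PRECONDITION & SPEC =====
-- Pre_ admits lists whose every element after the first is one of the four directions (the
-- first element is unconstrained: an empty stack short-circuits the lookup, so A pushes it and,
-- being un-poppable, it never raises).  This excludes some inputs A returns on: for a
-- non-direction token deeper in the list, whether A returns or raises KeyError depends on
-- whether the preceding prefix happens to cancel completely, which is not a closed-form
-- condition on the input (it would re-simulate the reduction).
def Pre_dir_reduce (arr : List String) : Prop :=
  ∀ s ∈ arr.tail, s = "NORTH" ∨ s = "SOUTH" ∨ s = "EAST" ∨ s = "WEST"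
instance (arr : List String) : Decidable (Pre_dir_reduce arr) := by unfold Pre_dir_reduce; infer_instance
def pvWitness_dir_reduce : List String := ["NORTH", "WEST", "EAST", "SOUTH", "WEST"]

def Spec_dir_reduce (arr : List String) (out : List String) : Prop := out = dir_reduce_alt arr
instance (arr : List String) (out : List String) : Decidable (Spec_dir_reduce arr out) := by unfold Spec_dir_reduce; infer_instance

-- ===== CLAIM (what is proved, stated in full; the proofs are below) =====
def Claim_equal_dir_reduce : Prop := ∀ (arr : List String), Dom_dir_reduce arr → Pre_dir_reduce arr → Spec_dir_reduce arr (dir_reduce arr)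

-- ===== LEMMAS AND PROOFS =====

-- total opposite function, agreeing with the dict on the four directions
def oppFn (s : String) : String :=
  if s = "NORTH" then "SOUTH" else if s = "SOUTH" then "NORTH" else if s = "EAST" then "WEST" else "EAST"

def ValidS (s : String) : Prop := s = "NORTH" ∨ s = "SOUTH" ∨ s = "EAST" ∨ s = "WEST"

theorem get?_valid {s : String} (h : ValidS s) : PySem.Dict.get? opposites s = some (oppFn s) := by
  rcases h with h | h | h | h <;> subst h <;> decide

theorem oppFn_invol {s : String} (h : ValidS s) : oppFn (oppFn s) = s := by
  rcases h with h | h | h | h <;> subst h <;> decide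

theorem oppFn_flip {a b : String} (ha : ValidS a) (hb : ValidS b) : oppFn a = b ↔ oppFn b = a := by
  rcases ha with h | h | h | h <;> subst h <;> rcases hb with h | h | h | h <;> subst h <;> decide

-- clean (exception-free) version of A's loop body
def stepS (stack : List String) (d : String) : List String :=
  if stack.getLast? = some (oppFn d) then stack.dropLast else stack ++ [d]

theorem stepA_valid {st : List String} {d : String} (hd : ValidS d) :
    stepA (some st) d = some (stepS st d) := by
  simp only [stepA, get?_valid hd, stepS]
  rcases st with _ | ⟨x, t⟩
  · simp
  · by_cases h : (x :: t).getLast? = some (oppFn d) <;> simp [h]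

theorem foldl_stepA_valid : ∀ {arr : List String} (st : List String), (∀ s ∈ arr, ValidS s) →
    arr.foldl stepA (some st) = some (arr.foldl stepS st) := by
  intro arr
  induction arr with
  | nil => intro st _; rfl
  | cons a t ih =>
    intro st hv
    simp only [List.foldl_cons, stepA_valid (hv a (by simp))]
    exact ih _ (fun s hs => hv s (by simp [hs]))

-- "no adjacent opposite pair"
def Red (l : List String) : Prop := List.IsChain (fun a b => oppFn a ≠ b) l

theorem red_getLast {st l : List String} {a : String} (h : Red (st ++ a :: l)) (ha : ValidS a) :
    st.getLast? ≠ some (oppFn a) := by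
  intro hlast
  rw [Red, List.isChain_append] at h
  exact h.2.2 (oppFn a) hlast a rfl (oppFn_invol ha)

-- no-pair lists are returned unchanged by A's stack loop
theorem foldl_stepS_red : ∀ {arr : List String} (st : List String), (∀ s ∈ arr, ValidS s) →
    Red (st ++ arr) → arr.foldl stepS st = st ++ arr := by
  intro arr
  induction arr with
  | nil => intro st _ _; simp
  | cons a t ih =>
    intro st hv hred
    have ha : ValidS a := hv a (by simp)
    have hpush : stepS st a = st ++ [a] := by
      simp [stepS, red_getLast hred ha]
    simp only [List.foldl_cons, hpush]
    have := ih (st ++ [a]) (fun s hs => hv s (by simp [hs])) (by simpa using hred)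
    simpa using this

-- the key two-step identity: cancelling a pair on top of a reduced stack is the identity
theorem two_step {st : List String} {y : String} (hy : ValidS y) (hred : Red st) :
    stepS (stepS st y) (oppFn y) = st := by
  by_cases h : st.getLast? = some (oppFn y)
  · have hdl : st.dropLast ++ [oppFn y] = st := List.dropLast_append_getLast? _ h
    have h1 : stepS st y = st.dropLast := by simp [stepS, h]
    have hcond : st.dropLast.getLast? ≠ some (oppFn (oppFn y)) := by
      rw [oppFn_invol hy]
      intro hl
      rw [← hdl, Red, List.isChain_append] at hred
      exact hred.2.2 y hl (oppFn y) rfl rfl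
    rw [h1, stepS, if_neg hcond, hdl]
  · have h1 : stepS st y = st ++ [y] := by simp [stepS, h]
    rw [h1, stepS, if_pos (by simp [oppFn_invol hy])]
    simp

theorem stepS_preserves {st : List String} {a : String} (ha : ValidS a)
    (hstv : ∀ s ∈ st, ValidS s) (hred : Red st) :
    Red (stepS st a) ∧ (∀ s ∈ stepS st a, ValidS s) := by
  by_cases h : st.getLast? = some (oppFn a)
  · have hdl : st.dropLast ++ [oppFn a] = st := List.dropLast_append_getLast? _ h
    refine ⟨?_, ?_⟩
    · simp only [stepS, if_pos h]
      have : Red (st.dropLast ++ [oppFn a]) := by rw [hdl]; exact hred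
      exact List.IsChain.left_of_append this
    · simp only [stepS, if_pos h]
      exact fun s hs => hstv s (List.dropLast_subset st hs)
  · refine ⟨?_, ?_⟩
    · simp only [stepS, if_neg h]
      rw [Red, List.isChain_append]
      refine ⟨hred, List.isChain_singleton _, ?_⟩
      intro x hx y hy
      cases hy
      intro he
      have hxv : ValidS x := hstv x (List.mem_of_getLast? hx)
      exact h (by rw [hx, ((oppFn_flip hxv ha).1 he).symm])
    · simp only [stepS, if_neg h]
      intro s hs
      rcases List.mem_append.1 hs with h' | h'
      · exact hstv s h'
      · cases List.mem_singleton.1 h'; exact ha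

theorem foldl_stepS_inv : ∀ {arr : List String} (st : List String), (∀ s ∈ arr, ValidS s) →
    (∀ s ∈ st, ValidS s) → Red st →
    Red (arr.foldl stepS st) ∧ (∀ s ∈ arr.foldl stepS st, ValidS s) := by
  intro arr
  induction arr with
  | nil => exact fun st _ hstv hred => ⟨hred, hstv⟩
  | cons a t ih =>
    intro st hv hstv hred
    have ha : ValidS a := hv a (by simp)
    obtain ⟨h1, h2⟩ := stepS_preserves ha hstv hred
    exact ih _ (fun s hs => hv s (by simp [hs])) h2 h1

-- deleting an adjacent opposite pair does not change A's result
theorem foldl_cancel {front back : List String} {y z : String}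
    (hv : ∀ s ∈ front ++ y :: z :: back, ValidS s) (hyz : oppFn y = z) :
    (front ++ y :: z :: back).foldl stepS [] = (front ++ back).foldl stepS [] := by
  have hvf : ∀ s ∈ front, ValidS s := fun s hs => hv s (by simp [hs])
  have hy : ValidS y := hv y (by simp)
  obtain ⟨hr, _⟩ := foldl_stepS_inv ([] : List String) hvf (by simp) List.isChain_nil
  have key : stepS (stepS (front.foldl stepS []) y) z = front.foldl stepS [] := by
    rw [← hyz]; exact two_step hy hr
  simp only [List.foldl_append, List.foldl_cons, key]

theorem cancelOnce_none_red {l : List String} (h : cancelOnce l = none)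
    (hv : ∀ s ∈ l, ValidS s) : Red l := by
  induction l with
  | nil => exact List.isChain_nil
  | cons a t ih =>
    match t with
    | [] => exact List.isChain_singleton _
    | b :: rest =>
      simp only [cancelOnce] at h
      have ha : ValidS a := hv a (by simp)
      split at h
      · exact absurd h (by simp)
      · rename_i hc
        rw [get?_valid ha] at hc
        have hnone : cancelOnce (b :: rest) = none := by
          cases hr : cancelOnce (b :: rest)
          · rfl
          · rw [hr] at h; simp at h
        have := ih hnone (fun s hs => hv s (by simp [hs]))
        refine List.isChain_cons.2 ⟨?_, this⟩
        intro y hy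
        cases hy
        simpa using hc

theorem cancelOnce_some_split : ∀ {l r : List String}, cancelOnce l = some r →
    ∃ front y z back, l = front ++ y :: z :: back ∧ r = front ++ back ∧
      PySem.Dict.get? opposites y = some z := by
  intro l
  induction l with
  | nil => intro r h; simp [cancelOnce] at h
  | cons a t ih =>
    intro r h
    rcases t with _ | ⟨b, rest⟩
    · simp [cancelOnce] at h
    · simp only [cancelOnce] at h
      split at h
      · rename_i hc
        injection h with h'
        exact ⟨[], a, b, rest, by simp, by simp [← h'], hc⟩
      · cases hr : cancelOnce (b :: rest) with
        | none => rw [hr] at h; simp at h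
        | some r' =>
          rw [hr] at h; cases h
          obtain ⟨f, y, z, bk, h1, h2, h3⟩ := ih hr
          exact ⟨a :: f, y, z, bk, by simp [h1], by simp [h2], h3⟩

theorem oppFn_valid {d : String} (hd : ValidS d) : ValidS (oppFn d) := by
  rcases hd with h | h | h | h <;> subst h <;> unfold ValidS oppFn <;> decide

theorem valid_of_get? {h v : String} (hg : PySem.Dict.get? opposites h = some v) : ValidS h := by
  have hm := PySem.Dict.mem_items_of_get?_eq_some opposites hg
  have hit : opposites.items = [("NORTH", "SOUTH"), ("SOUTH", "NORTH"), ("EAST", "WEST"), ("WEST", "EAST")] := by decide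
  rw [hit] at hm
  simp at hm
  rcases hm with ⟨rfl, rfl⟩ | ⟨rfl, rfl⟩ | ⟨rfl, rfl⟩ | ⟨rfl, rfl⟩ <;> unfold ValidS <;> simp

-- an element the dict does not know sits at the bottom of the stack for good
theorem foldl_stepS_invalid_bottom : ∀ {t : List String} (st : List String) {h : String},
    (∀ s ∈ t, ValidS s) → ¬ ValidS h →
    t.foldl stepS (h :: st) = h :: t.foldl stepS st := by
  intro t
  induction t with
  | nil => intro st h _ _; simp
  | cons d t' ih =>
    intro st h hv hh
    have hd : ValidS d := hv d (by simp)
    have hstep : stepS (h :: st) d = h :: stepS st d := by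
      rcases st with _ | ⟨x, xs⟩
      · have hne : h ≠ oppFn d := fun he => hh (he ▸ oppFn_valid hd)
        simp [stepS, hne]
      · by_cases hc : (x :: xs).getLast? = some (oppFn d)
        · simp [stepS, hc]
        · simp [stepS, hc]
    simp only [List.foldl_cons, hstep]
    exact ih _ (fun s hs => hv s (by simp [hs])) hh

theorem alt_of_none {l : List String} (h : cancelOnce l = none) : dir_reduce_alt l = l := by
  rw [dir_reduce_alt]
  split
  · rename_i r hr; rw [h] at hr; cases hr
  · rfl

theorem alt_of_some {l r : List String} (h : cancelOnce l = some r) :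
    dir_reduce_alt l = dir_reduce_alt r := by
  rw [dir_reduce_alt]
  split
  · rename_i r' hr; rw [h] at hr; cases hr; rfl
  · rename_i hr; rw [h] at hr; cases hr

theorem alt_cons_invalid : ∀ (n : ℕ) {t : List String} {h : String}, t.length ≤ n →
    (∀ s ∈ t, ValidS s) → ¬ ValidS h → dir_reduce_alt (h :: t) = h :: dir_reduce_alt t := by
  intro n
  induction n with
  | zero =>
    intro t h hlen _ _
    have : t = [] := List.length_eq_zero_iff.1 (Nat.le_zero.1 hlen)
    subst this
    rw [alt_of_none rfl, alt_of_none rfl]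
  | succ n ih =>
    intro t h hlen hv hh
    rcases t with _ | ⟨b, rest⟩
    · rw [alt_of_none rfl, alt_of_none rfl]
    · have hg : PySem.Dict.get? opposites h = none := by
        cases hg : PySem.Dict.get? opposites h with
        | none => rfl
        | some v => exact absurd (valid_of_get? hg) hh
      have hco : cancelOnce (h :: b :: rest) = (cancelOnce (b :: rest)).map (h :: ·) := by
        simp [cancelOnce, hg]
      cases hc : cancelOnce (b :: rest) with
      | none =>
        rw [alt_of_none (by rw [hco, hc]; rfl), alt_of_none hc]
      | some r =>
        rw [alt_of_some (by rw [hco, hc]; rfl), alt_of_some hc]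
        obtain ⟨f, y, z, bk, h1, h2, h3⟩ := cancelOnce_some_split hc
        have hrv : ∀ s ∈ r, ValidS s := by
          intro s hs
          apply hv
          rw [h1]
          rw [h2] at hs
          rcases List.mem_append.1 hs with h' | h' <;> simp [h']
        have hrl : r.length ≤ n := by
          have := cancelOnce_length hc
          simp only [List.length_cons] at hlen this
          omega
        exact ih hrl hrv hh

-- main equivalence, by strong induction on length
theorem main_equiv : ∀ (n : ℕ) (arr : List String), arr.length ≤ n → (∀ s ∈ arr, ValidS s) →
    arr.foldl stepS [] = dir_reduce_alt arr := by
  intro n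
  induction n with
  | zero =>
    intro arr hlen _
    have : arr = [] := List.length_eq_zero_iff.1 (Nat.le_zero.1 hlen)
    subst this; simp [alt_of_none (by decide : cancelOnce [] = none)]
  | succ n ih =>
    intro arr hlen hv
    rw [dir_reduce_alt]
    cases hc : cancelOnce arr with
    | none =>
      have := foldl_stepS_red [] hv (by simpa using cancelOnce_none_red hc hv)
      simpa using this
    | some r =>
      obtain ⟨front, y, z, back, rfl, rfl, hyz⟩ := cancelOnce_some_split hc
      rw [get?_valid (hv y (by simp))] at hyz
      rw [foldl_cancel hv (by simpa using hyz)]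
      have hlen' : (front ++ back).length ≤ n := by
        have := cancelOnce_length hc
        simp at this hlen ⊢
        omega
      exact ih _ hlen' (fun s hs => hv s (by
        rcases List.mem_append.1 hs with h | h
        · simp [h]
        · simp [h]))

-- ===== VERDICT (by name: the statement is the Claim_ definition above) =====
theorem dir_reduce_spec : Claim_equal_dir_reduce := by
  intro arr _ hpre
  unfold Spec_dir_reduce dir_reduce
  rcases arr with _ | ⟨h, t⟩
  · rw [alt_of_none (by decide)]; rfl
  · have hvt : ∀ s ∈ t, ValidS s := fun s hs => hpre s (by simpa using hs)
    by_cases hv : ValidS h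
    · have hall : ∀ s ∈ h :: t, ValidS s := by
        intro s hs
        rcases List.mem_cons.1 hs with rfl | hs
        · exact hv
        · exact hvt s hs
      rw [foldl_stepA_valid [] hall]
      simpa using main_equiv (h :: t).length (h :: t) le_rfl hall
    · have h0 : stepA (some []) h = some [h] := by simp [stepA]
      rw [List.foldl_cons, h0, foldl_stepA_valid [h] hvt,
        alt_cons_invalid t.length le_rfl hvt hv]
      have := foldl_stepS_invalid_bottom ([] : List String) hvt hv
      rw [Option.getD_some, this, main_equiv t.length t le_rfl hvt]
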